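-- pv_equiv track=rewrite | github.com/filliptm/ComfyUI_FL-CosyVoice3 | nodes/dialog.py | _parse_dialog_line
-- ===== SOURCE A (Python) =====
-- from typing import Tuple, Dict, Any, Optional, List
--
-- def _parse_dialog_line(line: str) -> Tuple[Optional[str], str]:
--     """
--     Parse a dialog line to extract speaker and content.
--
--     Returns:
--         Tuple of (speaker_id, content) or (None, "") if invalid
--     """
--     line = line.strip()
--     if not line:
--         return None, ""
--
--     # Check for speaker prefixes
--     prefixes = {
--         "SPEAKER A:": "A",
--         "SPEAKER B:": "B",
--         "SPEAKER C:": "C",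
--         "SPEAKER D:": "D",
--     }
--
--     for prefix, speaker_id in prefixes.items():
--         if line.upper().startswith(prefix):
--             content = line[len(prefix):].strip()
--             return speaker_id, content
--
--     return None, ""
-- ===== SOURCE B (Python) =====
-- def _parse_dialog_line(line):
--     """Positional parse: uppercase the 10-char head once, then check
--     'SPEAKER ', the speaker letter and ':' by position."""
--     s = line.strip()
--     if not s:
--         return None, ""
--     head = s[:10].upper()
--     if len(s) >= 10 and head.startswith("SPEAKER ") and head[8] in "ABCD" and head[9] == ":":
--         return head[8], s[10:].strip()
--     return None, ""
-- ===== Notes on version B (the rewrite author's own statement) =====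
-- stated objective: simpler
-- what changed: Replaces the loop over four 10-character prefix strings (re-uppercasing the whole line on each test) with a single positional parse: uppercase the 10-char head once, then check the fixed prefix, the speaker letter's membership among the four allowed letters, and the colon, each by position.
import Mathlib
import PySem

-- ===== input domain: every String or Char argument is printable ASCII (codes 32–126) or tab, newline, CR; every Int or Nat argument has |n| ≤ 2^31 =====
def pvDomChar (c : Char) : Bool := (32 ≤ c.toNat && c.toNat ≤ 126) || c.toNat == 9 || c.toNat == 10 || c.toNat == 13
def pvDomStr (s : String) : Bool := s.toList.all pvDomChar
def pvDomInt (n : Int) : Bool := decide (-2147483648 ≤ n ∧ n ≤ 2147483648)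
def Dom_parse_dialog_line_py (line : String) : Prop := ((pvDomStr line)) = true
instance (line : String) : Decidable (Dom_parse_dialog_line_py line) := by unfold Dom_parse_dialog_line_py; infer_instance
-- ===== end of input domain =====

-- B replaces A's loop over four prefix strings by a single positional parse of the
-- uppercased 10-char head (objective: simpler); return values proved equal on Dom.
-- ===== PORT A =====
-- A's prefix dict, as an association list in insertion order ("SPEAKER X:" as char lists).
def pvPrefixes : List (List Char × String) :=
  [(['S','P','E','A','K','E','R',' ','A',':'], "A"), (['S','P','E','A','K','E','R',' ','B',':'], "B"),
   (['S','P','E','A','K','E','R',' ','C',':'], "C"), (['S','P','E','A','K','E','R',' ','D',':'], "D")]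

-- A's 'for prefix, speaker_id in prefixes.items()' loop (line.upper() recomputed each test, as in A).
def pvALoop (l : List Char) : List (List Char × String) → Option String × String
  | [] => (none, "")
  | (p, sid) :: rest =>
    if PySem.Chars.startswith (PySem.Chars.upper l) p then
      (some sid, String.ofList (PySem.Chars.strip (PySem.Chars.slice l (some (p.length : Int)) none)))
    else pvALoop l rest

def parse_dialog_line_py (line : String) : Option String × String :=
  let l := PySem.Chars.strip line.toList
  if l = [] then (none, "") else pvALoop l pvPrefixes

-- ===== PORT B =====
-- Python's head[8]/head[9] are 1-char strings; ported as the Char (pyGetD, in range under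
-- the length guard) and 'head[8] in "ABCD"' as list membership — exact on that domain.
def parse_dialog_line_py_alt (line : String) : Option String × String :=
  let s := PySem.Chars.strip line.toList
  if s = [] then (none, "")
  else
    let head := PySem.Chars.upper (PySem.Chars.slice s none (some 10))
    if decide (10 ≤ s.length) && PySem.Chars.startswith head ['S','P','E','A','K','E','R',' ']
        && (['A','B','C','D'].contains (PySem.List.pyGetD head 8 ' '))
        && (PySem.List.pyGetD head 9 ' ' == ':') then
      (some (String.ofList [PySem.List.pyGetD head 8 ' ']),
       String.ofList (PySem.Chars.strip (PySem.Chars.slice s (some 10) none)))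
    else (none, "")

-- ===== PRECONDITION & SPEC =====
def Spec_parse_dialog_line_py (line : String) (out : Option String × String) : Prop := out = parse_dialog_line_py_alt line
instance (line : String) (out : Option String × String) : Decidable (Spec_parse_dialog_line_py line out) := by unfold Spec_parse_dialog_line_py; infer_instance

-- ===== CLAIM (what is proved, stated in full; the proofs are below) =====
def Claim_equal_parse_dialog_line_py : Prop := ∀ (line : String), Dom_parse_dialog_line_py line → Spec_parse_dialog_line_py line (parse_dialog_line_py line)

-- ===== LEMMAS AND PROOFS =====

-- A prefix longer than the line never matches.
lemma pvShort (l p : List Char) (h : l.length < p.length) :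
    PySem.Chars.startswith (PySem.Chars.upper l) p = false := by
  rw [Bool.eq_false_iff]
  intro hc
  have := ((PySem.Chars.startswith_iff _ _).mp hc).length_le
  simp [PySem.Chars.upper] at this
  omega

-- Core: A's prefix loop equals B's positional check, for every char list.
set_option maxHeartbeats 2000000 in
lemma pvMain (l : List Char) : pvALoop l pvPrefixes =
    (let head := PySem.Chars.upper (PySem.Chars.slice l none (some 10))
     if decide (10 ≤ l.length) && PySem.Chars.startswith head ['S','P','E','A','K','E','R',' ']
        && (['A','B','C','D'].contains (PySem.List.pyGetD head 8 ' '))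
        && (PySem.List.pyGetD head 9 ' ' == ':') then
      (some (String.ofList [PySem.List.pyGetD head 8 ' ']),
       String.ofList (PySem.Chars.strip (PySem.Chars.slice l (some 10) none)))
    else (none, "")) := by
  by_cases h : 10 ≤ l.length
  · rcases l with _ | ⟨c0, _ | ⟨c1, _ | ⟨c2, _ | ⟨c3, _ | ⟨c4, _ | ⟨c5, _ | ⟨c6, _ | ⟨c7, _ | ⟨c8, _ | ⟨c9, rest⟩⟩⟩⟩⟩⟩⟩⟩⟩⟩
    all_goals try simp at h
    simp only [pvALoop, pvPrefixes, PySem.Chars.startswith, PySem.Chars.upper,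
      PySem.Chars.slice_eq_listSlice, List.isPrefixOf, List.length_cons, List.length_nil,
      List.map_cons]
    norm_num [PySem.List.slice_from _ (show (0:Int) ≤ 10 by norm_num),
      PySem.List.slice_to _ (show (0:Int) ≤ 10 by norm_num), PySem.List.pyGetD_ofNat',
      List.cons_prefix_cons]
    simp only [@eq_comm Char]
    split_ifs <;> simp_all
    all_goals try tauto
    all_goals (rename_i hcond hbig; obtain ⟨-,-,-,-,-,-,-,-,h8,-⟩ := hcond; rw [← h8])
  · have hf : ∀ p : List Char, p.length = 10 →
        PySem.Chars.startswith (PySem.Chars.upper l) p = false := fun p hp =>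
      pvShort l p (by omega)
    simp only [pvALoop, pvPrefixes]
    rw [hf ['S','P','E','A','K','E','R',' ','A',':'] (by decide),
        hf ['S','P','E','A','K','E','R',' ','B',':'] (by decide),
        hf ['S','P','E','A','K','E','R',' ','C',':'] (by decide),
        hf ['S','P','E','A','K','E','R',' ','D',':'] (by decide)]
    simp [h]

-- ===== VERDICT (by name: the statement is the Claim_ definition above) =====
theorem parse_dialog_line_py_spec : Claim_equal_parse_dialog_line_py := by
  intro line _
  unfold Spec_parse_dialog_line_py parse_dialog_line_py parse_dialog_line_py_alt
  simp only []
  split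
  · rfl
  · exact pvMain _
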